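-- pv_equiv track=rewrite | github.com/satojkovic/algorithms | problems/is_possible_all_1s.py | is_possible_iter
-- ===== SOURCE A (Python) =====
-- def is_possible_iter(target):
--     import heapq
--     total = sum(target)
--     target = [-x for x in target]
--     heapq.heapify(target)
--     while -target[0] > 1:
--         max_elem = -target[0]
--         rest = total - max_elem
--         if max_elem == 1 or rest == 1: # Special case: [1, 100000] is True
--             return True
--         if max_elem < rest or rest == 0 or max_elem % rest == 0:
--             return False
--         before = max_elem % rest
--         total = total - max_elem + before
--         heapq.heapreplace(target, -before)
--     return True
-- ===== SOURCE B (Python) =====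
-- def is_possible_iter(target):
--     arr = list(target)
--     total = sum(arr)
--     while True:
--         max_elem = max(arr)
--         if max_elem <= 1:
--             return True
--         rest = total - max_elem
--         if rest == 1:
--             return True
--         if max_elem < rest or rest == 0 or max_elem % rest == 0:
--             return False
--         before = max_elem % rest
--         total = rest + before
--         arr[arr.index(max_elem)] = before
-- ===== Notes on version B (the rewrite author's own statement) =====
-- stated objective: simpler
-- what changed: Replaced the binary max-heap (heapify + heapreplace on a negated list) by a plain list with a linear max() scan per iteration and an in-place replacement of the first max occurrence, keeping the running total; same branch logic, no heapq.
import Mathlib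
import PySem

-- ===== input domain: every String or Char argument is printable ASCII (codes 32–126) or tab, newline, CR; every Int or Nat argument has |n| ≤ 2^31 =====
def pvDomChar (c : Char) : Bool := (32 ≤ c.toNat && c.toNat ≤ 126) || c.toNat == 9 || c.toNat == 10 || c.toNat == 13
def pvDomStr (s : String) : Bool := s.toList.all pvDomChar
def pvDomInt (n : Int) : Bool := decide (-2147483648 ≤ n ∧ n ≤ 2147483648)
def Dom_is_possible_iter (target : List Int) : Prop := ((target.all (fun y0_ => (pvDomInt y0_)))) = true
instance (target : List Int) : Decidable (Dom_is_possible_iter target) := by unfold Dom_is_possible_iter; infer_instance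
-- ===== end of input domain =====

-- Port equivalence: A uses a binary min-heap of negated values (heapq); B keeps a plain
-- list with a linear max() scan and replaces the first max occurrence (simpler, no heap).


-- ===== PORT A =====
-- heapq is not in PySem, so the heap is ported by hand: an array-based binary min-heap
-- with sift-down (exact for heapify/heapreplace observable behaviour: root = minimum,
-- contents a permutation; the loop only ever reads target[0]).
def pvSwap (l : List Int) (i j : Nat) : List Int :=
  (l.set i (l.getD j 0)).set j (l.getD i 0)

def pvSiftDown : Nat → List Int → Nat → List Int
  | 0, l, _ => l
  | fuel+1, l, i =>
    let n := l.length
    let s1 := if 2*i+1 < n ∧ l.getD (2*i+1) 0 < l.getD i 0 then 2*i+1 else i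
    let s2 := if 2*i+2 < n ∧ l.getD (2*i+2) 0 < l.getD s1 0 then 2*i+2 else s1
    if s2 = i then l else pvSiftDown fuel (pvSwap l i s2) s2

-- heapq.heapify: sift down each internal node, i = n//2-1 down to 0
def pvHeapifyAux : Nat → List Int → List Int
  | 0, l => l
  | k+1, l => pvHeapifyAux k (pvSiftDown l.length l k)

def pvHeapify (l : List Int) : List Int := pvHeapifyAux (l.length / 2) l

-- heapq.heapreplace: overwrite the root, sift it down
def pvHeapreplace (l : List Int) (v : Int) : List Int := pvSiftDown l.length (l.set 0 v) 0

-- the while loop of A; fuel is a totality device only (sum of positive parts bounds the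
-- number of iterations, since the replaced max strictly shrinks)
def pvLoopA : Nat → List Int → Int → Bool
  | 0, _, _ => false
  | fuel+1, h, total =>
    match PySem.List.pyGet? h 0 with
    | none => false          -- IndexError target[0] on empty heap: excluded by Pre_
    | some r =>
      if -r > 1 then
        let maxElem := -r
        let rest := total - maxElem
        if maxElem = 1 ∨ rest = 1 then true
        else if maxElem < rest ∨ rest = 0 ∨ PySem.Int.mod maxElem rest = 0 then false
        else
          let before := PySem.Int.mod maxElem rest
          pvLoopA fuel (pvHeapreplace h (-before)) (total - maxElem + before)
      else true

def is_possible_iter (target : List Int) : Bool :=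
  pvLoopA ((target.map (fun x => x.toNat)).sum + 1)
    (pvHeapify (target.map (fun x => -x))) target.sum

-- ===== PORT B =====
-- the while loop of B: max() scan, replace the first occurrence of the max
def pvLoopB : Nat → List Int → Int → Bool
  | 0, _, _ => false
  | fuel+1, arr, total =>
    match PySem.List.max? arr (fun y => y) with
    | none => false          -- ValueError max([]) on empty list: excluded by Pre_
    | some m =>
      if m ≤ 1 then true
      else
        let rest := total - m
        if rest = 1 then true
        else if m < rest ∨ rest = 0 ∨ PySem.Int.mod m rest = 0 then false
        else
          let before := PySem.Int.mod m rest
          match PySem.List.index? arr m with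
          | none => false    -- unreachable: m ∈ arr
          | some i => pvLoopB fuel (arr.set i before) (rest + before)

def is_possible_iter_alt (target : List Int) : Bool :=
  pvLoopB ((target.map (fun x => x.toNat)).sum + 1) target target.sum

-- ===== PRECONDITION & SPEC =====
-- Pre_ excludes only the empty list, on which A raises IndexError (and B ValueError).
def Pre_is_possible_iter (target : List Int) : Prop := target ≠ []
instance (target : List Int) : Decidable (Pre_is_possible_iter target) := by unfold Pre_is_possible_iter; infer_instance
def pvWitness_is_possible_iter : List Int := [3, 1]

def Spec_is_possible_iter (target : List Int) (out : Bool) : Prop := out = is_possible_iter_alt target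
instance (target : List Int) (out : Bool) : Decidable (Spec_is_possible_iter target out) := by unfold Spec_is_possible_iter; infer_instance

-- ===== CLAIM (what is proved, stated in full; the proofs are below) =====
def Claim_equal_is_possible_iter : Prop := ∀ (target : List Int), Dom_is_possible_iter target → Pre_is_possible_iter target → Spec_is_possible_iter target (is_possible_iter target)

-- ===== LEMMAS AND PROOFS =====

-- subtree membership: k lies in the subtree rooted at i (array heap indexing)
def pvInSub (i : Nat) : Nat → Prop
  | 0 => i = 0
  | k+1 => i = k+1 ∨ (i < k+1 ∧ pvInSub i (k/2))
termination_by k => k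
decreasing_by omega

lemma pvInSub_succ (i k : Nat) : pvInSub i (k+1) ↔ (i = k+1 ∨ (i < k+1 ∧ pvInSub i (k/2))) := by
  rw [pvInSub]

lemma pvInSub_le {i k : Nat} (h : pvInSub i k) : i ≤ k := by
  cases k with
  | zero => rw [pvInSub] at h; omega
  | succ k => rw [pvInSub_succ] at h; rcases h with h | ⟨h, _⟩ <;> omega

lemma pvInSub_refl (i : Nat) : pvInSub i i := by
  cases i with
  | zero => rw [pvInSub]
  | succ k => rw [pvInSub_succ]; left; rfl

lemma pvInSub_child1 {i k : Nat} (h : pvInSub i k) : pvInSub i (2*k+1) := by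
  rw [show 2*k+1 = (2*k)+1 by ring, pvInSub_succ]
  right
  exact ⟨by have := pvInSub_le h; omega, by rwa [show (2*k)/2 = k by omega]⟩

lemma pvInSub_child2 {i k : Nat} (h : pvInSub i k) : pvInSub i (2*k+2) := by
  rw [show 2*k+2 = (2*k+1)+1 by ring, pvInSub_succ]
  right
  exact ⟨by have := pvInSub_le h; omega, by rwa [show (2*k+1)/2 = k by omega]⟩

lemma pvInSub_zero (k : Nat) : pvInSub 0 k := by
  induction k using Nat.strong_induction_on with
  | _ k ih =>
    cases k with
    | zero => rw [pvInSub]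
    | succ k => rw [pvInSub_succ]; right; exact ⟨by omega, ih (k/2) (by omega)⟩

lemma pvInSub_trans {i j k : Nat} (hij : pvInSub i j) (hjk : pvInSub j k) : pvInSub i k := by
  induction k using Nat.strong_induction_on with
  | _ k ih =>
    cases k with
    | zero => rw [pvInSub] at hjk ⊢; subst hjk; rw [pvInSub] at hij; exact hij
    | succ k =>
      rw [pvInSub_succ] at hjk ⊢
      rcases hjk with h | ⟨hlt, hp⟩
      · subst h; rw [pvInSub_succ] at hij; exact hij
      · have hi := pvInSub_le hij
        by_cases he : i = k+1
        · exact Or.inl he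
        · exact Or.inr ⟨by omega, ih (k/2) (by omega) hp⟩

lemma pvInSub_comp {a b k : Nat} (ha : pvInSub a k) (hb : pvInSub b k) :
    pvInSub a b ∨ pvInSub b a := by
  induction k using Nat.strong_induction_on with
  | _ k ih =>
    cases k with
    | zero =>
      rw [pvInSub] at ha hb; subst ha; left; exact pvInSub_zero b
    | succ k =>
      rw [pvInSub_succ] at ha hb
      rcases ha with ha | ⟨ha1, ha2⟩
      · subst ha; right; rw [pvInSub_succ]; exact hb
      · rcases hb with hb | ⟨hb1, hb2⟩
        · subst hb; left; rw [pvInSub_succ]; right; exact ⟨ha1, ha2⟩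
        · exact ih (k/2) (by omega) ha2 hb2

lemma pvInSub_sibling {i k : Nat} (h1 : pvInSub (2*i+1) k) (h2 : pvInSub (2*i+2) k) : False := by
  rcases pvInSub_comp h1 h2 with h | h
  · rw [show 2*i+2 = (2*i+1)+1 from rfl, pvInSub_succ] at h
    rcases h with h | ⟨hlt, hp⟩
    · omega
    · rw [show (2*i+1)/2 = i by omega] at hp
      have := pvInSub_le hp; omega
  · have := pvInSub_le h; omega

-- subheap

def pvSubHeap (l : List Int) (j : Nat) : Prop :=
  ∀ c, (c = 2*j+1 ∨ c = 2*j+2) → c < l.length → l.getD j 0 ≤ l.getD c 0 ∧ pvSubHeap l c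
termination_by l.length - j
decreasing_by rcases ‹c = 2*j+1 ∨ c = 2*j+2› with h | h <;> omega

lemma pvSubHeap_iff (l : List Int) (j : Nat) :
    pvSubHeap l j ↔ ∀ c, (c = 2*j+1 ∨ c = 2*j+2) → c < l.length →
      l.getD j 0 ≤ l.getD c 0 ∧ pvSubHeap l c := by
  rw [pvSubHeap]

lemma pvSubHeap_leaf {l : List Int} {j : Nat} (h : l.length ≤ 2*j+1) : pvSubHeap l j := by
  rw [pvSubHeap_iff]; intro c hc hlt; omega

lemma pvSubHeap_transfer {l l' : List Int} (hlen : l.length = l'.length) {j : Nat}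
    (hval : ∀ k, pvInSub j k → k < l.length → l.getD k 0 = l'.getD k 0)
    (h : pvSubHeap l j) : pvSubHeap l' j := by
  have H : ∀ m j, l.length - j ≤ m →
      (∀ k, pvInSub j k → k < l.length → l.getD k 0 = l'.getD k 0) →
      pvSubHeap l j → pvSubHeap l' j := by
    intro m
    induction m with
    | zero =>
      intro j hm _ _
      exact pvSubHeap_leaf (by omega)
    | succ m ih =>
      intro j hm hval h
      rw [pvSubHeap_iff] at h ⊢
      intro c hc hclt
      have hclt' : c < l.length := by omega
      obtain ⟨h1, h2⟩ := h c hc hclt'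
      have hcin : pvInSub j c := by
        rcases hc with rfl | rfl
        · exact pvInSub_child1 (pvInSub_refl j)
        · exact pvInSub_child2 (pvInSub_refl j)
      refine ⟨?_, ?_⟩
      · rw [← hval j (pvInSub_refl j) (by omega), ← hval c hcin hclt']; exact h1
      · exact ih c (by rcases hc with rfl | rfl <;> omega)
          (fun k hk hklt => hval k (pvInSub_trans hcin hk) hklt) h2
  exact H (l.length - j) j le_rfl hval h

-- root of a total heap is the minimum
lemma pvHeap_root_min {l : List Int} (H : ∀ j, pvSubHeap l j) :
    ∀ k, k < l.length → l.getD 0 0 ≤ l.getD k 0 := by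
  intro k
  induction k using Nat.strong_induction_on with
  | _ k ih =>
    intro hk
    cases k with
    | zero => exact le_rfl
    | succ k =>
      have hp : (k+1-1)/2 < k+1 := by omega
      have h1 : l.getD 0 0 ≤ l.getD (k/2) 0 := ih (k/2) (by omega) (by omega)
      have h2 := (pvSubHeap_iff l (k/2)).mp (H (k/2)) (k+1) (by omega) hk
      exact le_trans h1 h2.1

lemma pvSetLenAppend (A B : List Int) (x v : Int) : (A ++ x :: B).set A.length v = A ++ v :: B := by
  induction A with
  | nil => rfl
  | cons a A ih => simp [ih]

lemma pvGetDLenAppend (A B : List Int) (x : Int) : (A ++ x :: B).getD A.length 0 = x := by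
  induction A with
  | nil => rfl
  | cons a A ih => simp only [List.cons_append, List.length_cons, List.getD_cons_succ]; exact ih

lemma pvGetD_set_ne {l : List Int} {a k : Nat} {v : Int} (h : k ≠ a) :
    (l.set a v).getD k 0 = l.getD k 0 := by
  simp [List.getD]
  rw [List.getElem?_set_ne h.symm]

lemma pvGetD_set_self {l : List Int} {a : Nat} {v : Int} (h : a < l.length) :
    (l.set a v).getD a 0 = v := by
  simp [List.getD, h]

lemma pvSwap_length (l : List Int) (i j : Nat) : (pvSwap l i j).length = l.length := by
  simp [pvSwap]

lemma pvSwap_getD_ne {l : List Int} {i j k : Nat} (h1 : k ≠ i) (h2 : k ≠ j) :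
    (pvSwap l i j).getD k 0 = l.getD k 0 := by
  rw [pvSwap, pvGetD_set_ne h2, pvGetD_set_ne h1]

lemma pvSwap_getD_left {l : List Int} {i j : Nat} (hne : i ≠ j) (hi : i < l.length) :
    (pvSwap l i j).getD i 0 = l.getD j 0 := by
  rw [pvSwap, pvGetD_set_ne hne, pvGetD_set_self hi]

lemma pvSwap_getD_right {l : List Int} {i j : Nat} (hj : j < l.length) :
    (pvSwap l i j).getD j 0 = l.getD i 0 := by
  rw [pvSwap, pvGetD_set_self (by simpa using hj)]

lemma pvSwap_ABC (A B C : List Int) (x y : Int) :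
    pvSwap (A ++ (x :: (B ++ (y :: C)))) A.length (A.length + 1 + B.length) =
      A ++ (y :: (B ++ (x :: C))) := by
  have hx : (A ++ (x :: (B ++ (y :: C)))).getD A.length 0 = x := pvGetDLenAppend _ _ _
  have hsh : A ++ (x :: (B ++ (y :: C))) = (A ++ (x :: B)) ++ (y :: C) := by simp
  have hlen : A.length + 1 + B.length = (A ++ (x :: B)).length := by simp; omega
  have hy : (A ++ (x :: (B ++ (y :: C)))).getD (A.length + 1 + B.length) 0 = y := by
    rw [hsh, hlen]; exact pvGetDLenAppend _ _ _
  rw [pvSwap, hx, hy, pvSetLenAppend,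
      show A ++ (y :: (B ++ (y :: C))) = (A ++ (y :: B)) ++ (y :: C) by simp,
      show A.length + 1 + B.length = (A ++ (y :: B)).length by simp; omega,
      pvSetLenAppend]
  simp

lemma pvSwap_perm {l : List Int} {i j : Nat} (hij : i < j) (hj : j < l.length) :
    (pvSwap l i j).Perm l := by
  have hi : i < l.length := lt_trans hij hj
  set A := l.take i with hA'
  set B := (l.drop (i+1)).take (j-i-1) with hB'
  set C := l.drop (j+1) with hC'
  have hA : A.length = i := by simp [hA']; omega
  have hB : B.length = j-i-1 := by simp [hB']; omega
  have hdec : l = A ++ (l[i] :: (B ++ (l[j] :: C))) := by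
    calc l = l.take i ++ l.drop i := (List.take_append_drop i l).symm
    _ = A ++ (l[i] :: l.drop (i+1)) := by rw [List.drop_eq_getElem_cons hi]
    _ = A ++ (l[i] :: (B ++ (l.drop (i+1)).drop (j-i-1))) := by rw [List.take_append_drop]
    _ = A ++ (l[i] :: (B ++ l.drop j)) := by rw [List.drop_drop, show i+1+(j-i-1) = j by omega]
    _ = A ++ (l[i] :: (B ++ (l[j] :: C))) := by rw [List.drop_eq_getElem_cons hj]
  have habc := pvSwap_ABC A B C l[i] l[j]
  rw [hA, hB, show i + 1 + (j-i-1) = j by omega, ← hdec] at habc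
  rw [habc]
  conv_rhs => rw [hdec]
  refine List.Perm.append_left A ?_
  exact (List.Perm.cons _ List.perm_middle).trans
    ((List.Perm.swap _ _ _).trans (List.Perm.cons _ List.perm_middle.symm))

lemma pvSiftDown_cases (fuel : Nat) (l : List Int) (i : Nat) :
    (pvSiftDown (fuel+1) l i = l ∧
      (∀ c, (c = 2*i+1 ∨ c = 2*i+2) → c < l.length → l.getD i 0 ≤ l.getD c 0))
    ∨ (∃ s, (s = 2*i+1 ∨ s = 2*i+2) ∧ s < l.length ∧ l.getD s 0 < l.getD i 0 ∧
        (∀ c, (c = 2*i+1 ∨ c = 2*i+2) → c < l.length → l.getD s 0 ≤ l.getD c 0) ∧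
        pvSiftDown (fuel+1) l i = pvSiftDown fuel (pvSwap l i s) s) := by
  rw [pvSiftDown]
  by_cases hc1 : 2*i+1 < l.length ∧ l.getD (2*i+1) 0 < l.getD i 0
  · rw [if_pos hc1]
    by_cases hc2 : 2*i+2 < l.length ∧ l.getD (2*i+2) 0 < l.getD (2*i+1) 0
    · rw [if_pos hc2, if_neg (by omega)]
      exact Or.inr ⟨2*i+2, Or.inr rfl, hc2.1, lt_trans hc2.2 hc1.2, by
        intro c hc hclt
        rcases hc with rfl | rfl
        · exact le_of_lt hc2.2
        · exact le_rfl, rfl⟩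
    · rw [if_neg hc2, if_neg (by omega)]
      exact Or.inr ⟨2*i+1, Or.inl rfl, hc1.1, hc1.2, by
        intro c hc hclt
        rcases hc with rfl | rfl
        · exact le_rfl
        · exact le_of_not_gt fun h => hc2 ⟨hclt, h⟩, rfl⟩
  · rw [if_neg hc1]
    by_cases hc2 : 2*i+2 < l.length ∧ l.getD (2*i+2) 0 < l.getD i 0
    · rw [if_pos hc2, if_neg (by omega)]
      exact Or.inr ⟨2*i+2, Or.inr rfl, hc2.1, hc2.2, by
        intro c hc hclt
        rcases hc with rfl | rfl
        · exact le_of_lt (lt_of_lt_of_le hc2.2 (le_of_not_gt fun h => hc1 ⟨hclt, h⟩))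
        · exact le_rfl, rfl⟩
    · rw [if_neg hc2, if_pos rfl]
      refine Or.inl ⟨rfl, ?_⟩
      intro c hc hclt
      rcases hc with rfl | rfl
      · exact le_of_not_gt fun h => hc1 ⟨hclt, h⟩
      · exact le_of_not_gt fun h => hc2 ⟨hclt, h⟩

lemma pvSiftDown_length : ∀ (fuel : Nat) (l : List Int) (i : Nat),
    (pvSiftDown fuel l i).length = l.length := by
  intro fuel
  induction fuel with
  | zero => intro l i; rfl
  | succ fuel ih =>
    intro l i
    rcases pvSiftDown_cases fuel l i with ⟨he, _⟩ | ⟨s, _, _, _, _, he⟩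
    · rw [he]
    · rw [he, ih, pvSwap_length]

lemma pvSiftDown_perm : ∀ (fuel : Nat) (l : List Int) (i : Nat),
    (pvSiftDown fuel l i).Perm l := by
  intro fuel
  induction fuel with
  | zero => intro l i; rfl
  | succ fuel ih =>
    intro l i
    rcases pvSiftDown_cases fuel l i with ⟨he, _⟩ | ⟨s, hs, hsn, _, _, he⟩
    · rw [he]
    · rw [he]
      exact (ih _ _).trans (pvSwap_perm (by omega) hsn)

lemma pvSiftDown_getD_out : ∀ (fuel : Nat) (l : List Int) (i k : Nat), ¬ pvInSub i k →
    (pvSiftDown fuel l i).getD k 0 = l.getD k 0 := by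
  intro fuel
  induction fuel with
  | zero => intro l i k _; rfl
  | succ fuel ih =>
    intro l i k hk
    rcases pvSiftDown_cases fuel l i with ⟨he, _⟩ | ⟨s, hs, hsn, _, _, he⟩
    · rw [he]
    · rw [he]
      have hins : pvInSub i s := by
        rcases hs with rfl | rfl
        · exact pvInSub_child1 (pvInSub_refl i)
        · exact pvInSub_child2 (pvInSub_refl i)
      have hnk : ¬ pvInSub s k := fun h => hk (pvInSub_trans hins h)
      rw [ih _ _ _ hnk, pvSwap_getD_ne (fun h => hk (by rw [h]; exact pvInSub_refl i))
        (fun h => hk (by rw [h]; exact hins))]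

lemma pvSiftDown_main : ∀ (fuel : Nat) (l : List Int) (i : Nat),
    l.length ≤ fuel + i →
    (∀ j, i < j → pvSubHeap l j) →
    (∀ j, i ≤ j → pvSubHeap (pvSiftDown fuel l i) j) ∧
    (∀ b, b ≤ l.getD i 0 →
      (∀ c, (c = 2*i+1 ∨ c = 2*i+2) → c < l.length → b ≤ l.getD c 0) →
      b ≤ (pvSiftDown fuel l i).getD i 0) := by
  intro fuel
  induction fuel with
  | zero =>
    intro l i hfuel H
    refine ⟨fun j hij => ?_, fun b hb _ => hb⟩
    exact (pvSubHeap_leaf (show l.length ≤ 2*j+1 by omega) : pvSubHeap l j)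
  | succ fuel ih =>
    intro l i hfuel H
    rcases pvSiftDown_cases fuel l i with ⟨he, hbnd⟩ | ⟨s, hs, hsn, hslt, hsmin, he⟩
    · rw [he]
      refine ⟨fun j hij => ?_, fun b hb _ => hb⟩
      rcases Nat.eq_or_lt_of_le hij with rfl | hlt
      · rw [pvSubHeap_iff]
        exact fun c hc hclt => ⟨hbnd c hc hclt, H c (by omega)⟩
      · exact H j hlt
    · have his : i < s := by omega
      have hin : i < l.length := lt_trans his hsn
      have hlen' : (pvSwap l i s).length = l.length := pvSwap_length l i s
      have hparent : ∀ j, i < j → pvInSub j s → j = s := by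
        intro j hj hjs
        by_contra hne
        have hs1 : s = (s-1)+1 := by omega
        rw [hs1, pvInSub_succ] at hjs
        rcases hjs with h | ⟨_, hp⟩
        · omega
        · rw [show (s-1)/2 = i by omega] at hp
          have := pvInSub_le hp; omega
      have hsibdisj : ∀ t k, (t = 2*i+1 ∨ t = 2*i+2) → t ≠ s → pvInSub t k → pvInSub s k → False := by
        intro t k ht htne h1 h2
        rcases ht with rfl | rfl
        · rcases hs with rfl | rfl
          · omega
          · exact pvInSub_sibling h1 h2
        · rcases hs with rfl | rfl
          · exact pvInSub_sibling h2 h1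
          · omega
      have hpre : ∀ j, s < j → pvSubHeap (pvSwap l i s) j := by
        intro j hj
        refine pvSubHeap_transfer hlen'.symm (fun k hk hklt => ?_) (H j (by omega))
        have hkj := pvInSub_le hk
        exact (pvSwap_getD_ne (by omega) (by omega)).symm
      obtain ⟨ha', hb'⟩ := ih (pvSwap l i s) s (by omega) hpre
      have hri : (pvSiftDown fuel (pvSwap l i s) s).getD i 0 = l.getD s 0 := by
        rw [pvSiftDown_getD_out fuel _ s i (fun h => by have := pvInSub_le h; omega),
            pvSwap_getD_left (by omega) hin]
      have hrlen : (pvSiftDown fuel (pvSwap l i s) s).length = l.length := by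
        rw [pvSiftDown_length, hlen']
      -- value at s after the recursive call is at least l[s] (the minimum moved up)
      have hrs : l.getD s 0 ≤ (pvSiftDown fuel (pvSwap l i s) s).getD s 0 := by
        refine hb' (l.getD s 0) ?_ ?_
        · rw [pvSwap_getD_right hsn]; exact le_of_lt hslt
        · intro d hd hdlt
          rw [hlen'] at hdlt
          rw [pvSwap_getD_ne (by omega) (by omega)]
          have := (pvSubHeap_iff l s).mp (H s his) d (by omega) hdlt
          exact this.1
      -- values and heaps at the untouched sibling
      have htouch : ∀ t, (t = 2*i+1 ∨ t = 2*i+2) → t ≠ s →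
          (pvSiftDown fuel (pvSwap l i s) s).getD t 0 = l.getD t 0 := by
        intro t ht htne
        rw [pvSiftDown_getD_out fuel _ s t
              (fun h => hsibdisj t t ht htne (pvInSub_refl t) h),
            pvSwap_getD_ne (by omega) htne]
      constructor
      · intro j hij
        rw [he]
        rcases Nat.lt_or_ge j s with hjs | hjs
        · rcases Nat.eq_or_lt_of_le hij with rfl | hjgt
          · -- j = i : rebuild the heap property at the root of the subtree
            rw [pvSubHeap_iff]
            intro c hc hclt
            rw [hrlen] at hclt
            by_cases hcs : c = s
            · subst hcs
              exact ⟨by rw [hri]; exact hrs, ha' c le_rfl⟩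
            · refine ⟨by rw [hri, htouch c hc hcs]; exact hsmin c hc hclt, ?_⟩
              refine pvSubHeap_transfer (by omega) (fun k hk hklt => ?_) (H c (by omega))
              have hkc := pvInSub_le hk
              have hnsk : ¬ pvInSub s k := fun h => hsibdisj c k hc hcs hk h
              rw [pvSiftDown_getD_out fuel _ s k hnsk,
                  pvSwap_getD_ne (by omega) (fun h => hnsk (by rw [h]; exact pvInSub_refl s))]
          · -- i < j < s : j is outside the modified subtree
            refine pvSubHeap_transfer (by omega) (fun k hk hklt => ?_) (H j hjgt)
            have hkj := pvInSub_le hk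
            have hnjs : ¬ pvInSub j s := fun h => by have := hparent j hjgt h; omega
            have hnsk : ¬ pvInSub s k := by
              intro h
              rcases pvInSub_comp hk h with h' | h'
              · exact hnjs h'
              · have := pvInSub_le h'; omega
            rw [pvSiftDown_getD_out fuel _ s k hnsk,
                pvSwap_getD_ne (by omega) (fun h => hnsk (by rw [h]; exact pvInSub_refl s))]
        · exact ha' j hjs
      · intro b hb hbc
        rw [he, hri]
        exact hbc s hs hsn

lemma pvHeapifyAux_spec : ∀ (k : Nat) (l : List Int), (∀ j, k ≤ j → pvSubHeap l j) →
    (∀ j, pvSubHeap (pvHeapifyAux k l) j) ∧ (pvHeapifyAux k l).Perm l := by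
  intro k
  induction k with
  | zero => exact fun l H => ⟨fun j => H j (Nat.zero_le j), List.Perm.refl l⟩
  | succ k ih =>
    intro l H
    have main := pvSiftDown_main l.length l k (by omega) (fun j hj => H j (by omega))
    obtain ⟨hsub, hperm⟩ := ih (pvSiftDown l.length l k)
      (fun j hj => main.1 j hj)
    exact ⟨hsub, hperm.trans (pvSiftDown_perm _ _ _)⟩

lemma pvHeapify_spec (l : List Int) :
    (∀ j, pvSubHeap (pvHeapify l) j) ∧ (pvHeapify l).Perm l := by
  refine pvHeapifyAux_spec (l.length / 2) l (fun j hj => pvSubHeap_leaf (by omega))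

lemma pvHeapreplace_spec (l : List Int) (v : Int) (H : ∀ j, pvSubHeap l j) :
    (∀ j, pvSubHeap (pvHeapreplace l v) j) ∧ (pvHeapreplace l v).Perm (l.set 0 v) := by
  have hlen : (l.set 0 v).length = l.length := List.length_set ..
  have main := pvSiftDown_main l.length (l.set 0 v) 0 (by omega) ?_
  · exact ⟨fun j => main.1 j (Nat.zero_le j), pvSiftDown_perm _ _ _⟩
  · intro j hj
    refine pvSubHeap_transfer hlen.symm (fun k hk hklt => ?_) (H j)
    have := pvInSub_le hk
    exact (pvGetD_set_ne (by omega)).symm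

lemma pvLoop_eq : ∀ (fuel : Nat) (h arr : List Int) (total : Int),
    h.Perm (arr.map (fun x => -x)) → (∀ j, pvSubHeap h j) → arr ≠ [] →
    pvLoopA fuel h total = pvLoopB fuel arr total := by
  intro fuel
  induction fuel with
  | zero => intro h arr total _ _ _; rfl
  | succ fuel ih =>
    intro h arr total hperm Hheap harr
    obtain ⟨m, hmx⟩ : ∃ m, PySem.List.max? arr (fun y => y) = some m := by
      rcases hq : PySem.List.max? arr (fun y => y) with _ | m
      · exact absurd ((PySem.List.max?_eq_none_iff _ _).mp hq) harr
      · exact ⟨m, rfl⟩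
    have hmem : m ∈ arr := PySem.List.max?_mem hmx
    have hmax : ∀ y ∈ arr, y ≤ m := PySem.List.max?_isMax hmx
    have hne : h ≠ [] := by
      intro hnil
      apply harr
      have := hperm.length_eq
      rw [hnil] at this
      simp only [List.length_nil, List.length_map] at this
      exact List.eq_nil_of_length_eq_zero this.symm
    obtain ⟨h0, ht, rfl⟩ : ∃ h0 ht, h = h0 :: ht := by
      cases h with
      | nil => exact absurd rfl hne
      | cons a t => exact ⟨a, t, rfl⟩
    have hroot := pvHeap_root_min Hheap
    have hh0 : h0 = -m := by
      have hmem' : (-m) ∈ (h0 :: ht) := hperm.mem_iff.mpr (List.mem_map_of_mem hmem)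
      obtain ⟨k, hk, hkv⟩ := List.mem_iff_getElem.mp hmem'
      have le1 : h0 ≤ -m := by
        have := hroot k hk
        rwa [List.getD_eq_getElem _ _ hk, hkv, show (h0::ht).getD 0 0 = h0 from rfl] at this
      have le2 : -m ≤ h0 := by
        have hh0m : h0 ∈ arr.map (fun x => -x) := hperm.mem_iff.mp List.mem_cons_self
        obtain ⟨x, hx, hxe⟩ := List.mem_map.mp hh0m
        have := hmax x hx
        omega
      omega
    rw [pvLoopA, pvLoopB, hmx, PySem.List.pyGet?_zero_cons]
    subst hh0
    simp only [neg_neg]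
    by_cases hm1 : m ≤ 1
    · rw [if_neg (by omega), if_pos hm1]
    · rw [if_pos (by omega), if_neg hm1]
      by_cases hr1 : total - m = 1
      · rw [if_pos (Or.inr hr1), if_pos hr1]
      · rw [if_neg (by exact fun hor => hor.elim (by omega) hr1), if_neg hr1]
        by_cases hF : m < total - m ∨ total - m = 0 ∨ PySem.Int.mod m (total - m) = 0
        · rw [if_pos hF, if_pos hF]
        · rw [if_neg hF, if_neg hF]
          obtain ⟨i, hidx⟩ : ∃ i, PySem.List.index? arr m = some i :=
            Option.isSome_iff_exists.mp ((PySem.List.index?_isSome_iff _ _).mpr hmem)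
          rw [hidx]
          obtain ⟨pre, suf, hdec, hlen, -⟩ := (PySem.List.index?_eq_some_iff _ _ _).mp hidx
          set before := PySem.Int.mod m (total - m) with hbef
          -- B's new list
          have hset : arr.set i before = pre ++ before :: suf := by
            rw [hdec, ← hlen, pvSetLenAppend]
          -- multiset invariant for the recursive call
          have hrep := pvHeapreplace_spec (-m :: ht) (-before) Hheap
          have htperm : ht.Perm (pre.map (fun x => -x) ++ suf.map (fun x => -x)) := by
            have : (-m :: ht).Perm ((-m) :: (pre.map (fun x => -x) ++ suf.map (fun x => -x))) := by
              refine hperm.trans ?_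
              rw [hdec]
              simp only [List.map_append, List.map_cons]
              exact List.perm_middle
            exact this.cons_inv
          have hperm' : (pvHeapreplace (-m :: ht) (-before)).Perm
              ((arr.set i before).map (fun x => -x)) := by
            refine hrep.2.trans ?_
            rw [hset]
            simp only [List.map_append, List.map_cons, List.set]
            exact ((htperm.cons (-before)).trans List.perm_middle.symm)
          refine ih _ _ _ hperm' hrep.1 ?_
          intro hnil
          have := congrArg List.length hnil
          rw [List.length_set, hdec] at this
          simp at this

-- ===== VERDICT (by name: the statement is the Claim_ definition above) =====
theorem is_possible_iter_spec : Claim_equal_is_possible_iter := by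
  intro target hdom hpre
  unfold Spec_is_possible_iter
  exact pvLoop_eq _ _ _ _ (pvHeapify_spec (target.map (fun x => -x))).2
    (pvHeapify_spec (target.map (fun x => -x))).1 hpre
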